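-- pv_equiv track=rewrite | github.com/surpmh/PCCP-study | 기능개발.py | solution
-- ===== SOURCE A (Python) =====
-- from collections import deque
-- import math
--
-- def solution(progresses, speeds):
--     q = deque()
--     answer = []
--
--     for progress, speed in zip(progresses, speeds):
--         q.append(math.ceil((100 - progress) / speed))
--
--     d = q[0]
--     q.popleft()
--     count = 1
--
--     while q:
--         if q[0] <= d:
--             count += 1
--             q.popleft()
--         else:
--             answer.append(count)
--             count = 0
--             d = q[0]
--
--     answer.append(count)
--
--     return answer
-- ===== SOURCE B (Python) =====
-- import math
--
-- def solution(progresses, speeds):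
--     days = [math.ceil((100 - p) / s) for p, s in zip(progresses, speeds)]
--     leaders = days[:1]
--     for d in days[1:]:
--         leaders.append(max(leaders[-1], d))
--     answer = []
--     for i, m in enumerate(leaders):
--         if i == 0 or m > leaders[i - 1]:
--             answer.append(1)
--         else:
--             answer[-1] += 1
--     return answer
-- ===== Notes on version B (the rewrite author's own statement) =====
-- stated objective: simpler
-- what changed: Replaces A's deque with popleft and the leader/counter state machine by three plain passes: build the days list, take its running maximum, and count the run lengths of equal consecutive running-maximum values.
import Mathlib
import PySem

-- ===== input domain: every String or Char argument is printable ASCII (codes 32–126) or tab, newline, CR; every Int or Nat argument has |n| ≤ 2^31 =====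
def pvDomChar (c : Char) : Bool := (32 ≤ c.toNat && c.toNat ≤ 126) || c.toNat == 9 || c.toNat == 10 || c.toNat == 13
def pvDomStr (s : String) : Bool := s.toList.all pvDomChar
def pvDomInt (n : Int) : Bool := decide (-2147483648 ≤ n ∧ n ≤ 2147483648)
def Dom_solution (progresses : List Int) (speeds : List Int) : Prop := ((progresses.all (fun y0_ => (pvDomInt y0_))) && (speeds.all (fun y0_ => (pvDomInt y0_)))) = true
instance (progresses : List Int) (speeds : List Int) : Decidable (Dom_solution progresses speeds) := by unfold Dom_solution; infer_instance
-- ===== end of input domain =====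

-- B replaces A's deque/popleft leader loop by three plain passes: the days list, its running
-- maximum, and run-length counting of the equal stretches of that running maximum (objective: simpler).

-- math.ceil((100 - p) / s): on Dom (|ints| ≤ 2^31) the float quotient n/s is within half an ulp
-- (≤ |n/s|·2⁻⁵³ < 1/|s|, the least distance of a non-integer n/s to an integer) of the exact value,
-- so its ceiling equals the exact rational ceiling -((-n) // s); ported exactly as that.
def pvCeilDiv (n : Int) (s : Int) : Int := -(PySem.Int.floordiv (-n) s)

-- ===== PORT A =====
-- measure for A's while loop: the 'else' branch does not pop, but makes the head ≤ d
def pvLoopAMeasure : List Int → Int → Nat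
  | [], _ => 0
  | x :: rest, d => 2 * (rest.length + 1) + (if x ≤ d then 0 else 1)

-- A's while loop over the deque q with leader d, counter count, accumulator answer
def pvLoopA : List Int → Int → Int → List Int → List Int
  | [], _, count, answer => answer ++ [count]
  | x :: rest, d, count, answer =>
      if x ≤ d then pvLoopA rest d (count + 1) answer
      else pvLoopA (x :: rest) x 0 (answer ++ [count])
termination_by q d _ _ => pvLoopAMeasure q d
decreasing_by
  · cases rest with
    | nil => simp [pvLoopAMeasure]
    | cons y r => simp [pvLoopAMeasure]; split <;> omega
  · simp_all [pvLoopAMeasure]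
    split <;> omega

def solution (progresses : List Int) (speeds : List Int) : List Int :=
  let q := (progresses.zip speeds).map (fun ps => pvCeilDiv (100 - ps.1) ps.2)
  match q with
  | [] => []            -- Python A raises IndexError at q[0] here; excluded by Pre_solution
  | d :: rest => pvLoopA rest d 1 []

-- ===== PORT B =====
-- leaders[1:]: running maximum continued from m
def pvPrefixMax : Int → List Int → List Int
  | _, [] => []
  | m, d :: rest => (max m d) :: pvPrefixMax (max m d) rest

-- run lengths of equal stretches (leaders is nondecreasing): prev = leaders[i-1], run = answer[-1]
def pvRuns : Int → Int → List Int → List Int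
  | _, run, [] => [run]
  | prev, run, m :: ms => if m > prev then run :: pvRuns m 1 ms else pvRuns m (run + 1) ms

def solution_alt (progresses : List Int) (speeds : List Int) : List Int :=
  let days := (progresses.zip speeds).map (fun ps => pvCeilDiv (100 - ps.1) ps.2)
  match days with
  | [] => []
  | d :: rest => pvRuns d 1 (pvPrefixMax d rest)

-- ===== PRECONDITION & SPEC =====
-- Python A raises IndexError when zip(progresses, speeds) is empty and ZeroDivisionError on a
-- zipped speed of 0; Pre_ excludes exactly those inputs.
def Pre_solution (progresses : List Int) (speeds : List Int) : Prop :=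
  progresses ≠ [] ∧ speeds ≠ [] ∧ ∀ s ∈ speeds.take progresses.length, s ≠ 0
instance (progresses : List Int) (speeds : List Int) : Decidable (Pre_solution progresses speeds) := by unfold Pre_solution; infer_instance
def pvWitness_solution : List Int × List Int := ([93, 30, 55], [1, 30, 5])

def Spec_solution (progresses : List Int) (speeds : List Int) (out : List Int) : Prop := out = solution_alt progresses speeds
instance (progresses : List Int) (speeds : List Int) (out : List Int) : Decidable (Spec_solution progresses speeds out) := by unfold Spec_solution; infer_instance

-- ===== CLAIM (what is proved, stated in full; the proofs are below) =====
def Claim_equal_solution : Prop := ∀ (progresses : List Int) (speeds : List Int), Dom_solution progresses speeds → Pre_solution progresses speeds → Spec_solution progresses speeds (solution progresses speeds)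

-- ===== LEMMAS AND PROOFS =====
-- invariant of A's loop: d is the running maximum, so A's groups are B's runs of pvPrefixMax
theorem pvLoopA_eq (q : List Int) (d count : Int) (answer : List Int) :
    pvLoopA q d count answer = answer ++ pvRuns d count (pvPrefixMax d q) := by
  induction q, d, count, answer using pvLoopA.induct with
  | case1 d count answer => simp [pvLoopA, pvRuns, pvPrefixMax]
  | case2 x rest d count answer h ih =>
      rw [pvLoopA]
      simp only [if_pos h]
      rw [ih, pvPrefixMax, pvRuns]
      have : max d x = d := by omega
      rw [this]
      simp only [if_neg (by omega : ¬ d > d)]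
  | case3 x rest d count answer h ih =>
      rw [pvLoopA]
      simp only [if_neg h]
      rw [ih]
      have hx : max x x = x := by omega
      have hd : max d x = x := by omega
      rw [pvPrefixMax, pvPrefixMax, hx, hd, pvRuns, pvRuns]
      simp only [if_neg (by omega : ¬ x > x), if_pos (by omega : x > d)]
      simp

-- ===== VERDICT (by name: the statement is the Claim_ definition above) =====
theorem solution_spec : Claim_equal_solution := by
  intro progresses speeds _ _
  unfold Spec_solution solution solution_alt
  cases h : (progresses.zip speeds).map (fun ps => pvCeilDiv (100 - ps.1) ps.2) with
  | nil => simp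
  | cons d rest => simpa using pvLoopA_eq rest d 1 []
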